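-- pv_equiv track=rewrite | github.com/calebgp/topas | exercises-2023/d.py | calcPoints
-- ===== SOURCE A (Python) =====
-- def calcPoints(deck):
--     points = 0
--     counted_cards = set()
--     for card in deck:
--         if deck.count(card) >= 4 and card not in counted_cards:
--             points += 10 * card
--             counted_cards.add(card)
--         elif deck.count(card) == 3 and card not in counted_cards:
--             points += 5 * card
--             counted_cards.add(card)
--         elif deck.count(card) == 2 and card not in counted_cards:
--             points += 3 * card
--             counted_cards.add(card)
--         elif card not in counted_cards:
--             points += card
--     return points
-- ===== SOURCE B (Python) =====
-- def calcPoints(deck):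
--     counts = {}
--     for card in deck:
--         counts[card] = counts.get(card, 0) + 1
--     total = 0
--     for card, n in counts.items():
--         if n >= 4:
--             total += 10 * card
--         elif n == 3:
--             total += 5 * card
--         elif n == 2:
--             total += 3 * card
--         else:
--             total += card
--     return total
-- ===== Notes on version B (the rewrite author's own statement) =====
-- stated objective: faster
-- what changed: B builds a multiplicity dictionary in one pass and sums multiplier*card per distinct card, replacing A's O(n) deck.count scan inside the loop and its counted_cards set bookkeeping.
import Mathlib
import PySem

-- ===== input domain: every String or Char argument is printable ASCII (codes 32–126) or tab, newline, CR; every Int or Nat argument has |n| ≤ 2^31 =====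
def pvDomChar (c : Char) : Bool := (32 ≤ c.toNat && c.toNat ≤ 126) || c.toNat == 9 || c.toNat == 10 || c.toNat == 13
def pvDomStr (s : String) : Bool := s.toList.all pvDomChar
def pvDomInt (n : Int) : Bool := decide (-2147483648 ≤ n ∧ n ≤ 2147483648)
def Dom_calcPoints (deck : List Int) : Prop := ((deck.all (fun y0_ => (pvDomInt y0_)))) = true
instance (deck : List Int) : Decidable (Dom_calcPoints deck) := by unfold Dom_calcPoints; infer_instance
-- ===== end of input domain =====

-- B replaces A's repeated deck.count scan per card by a one-pass multiplicity dictionary summed per distinct card (faster).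


-- ===== PORT A =====
def calcPoints (deck : List Int) : Int :=
  (deck.foldl (fun (s : Int × PySem.Set Int) card =>
      if 4 ≤ deck.count card ∧ ¬ (PySem.Set.contains s.2 card = true) then
        (s.1 + 10 * card, PySem.Set.add s.2 card)
      else if deck.count card = 3 ∧ ¬ (PySem.Set.contains s.2 card = true) then
        (s.1 + 5 * card, PySem.Set.add s.2 card)
      else if deck.count card = 2 ∧ ¬ (PySem.Set.contains s.2 card = true) then
        (s.1 + 3 * card, PySem.Set.add s.2 card)
      else if ¬ (PySem.Set.contains s.2 card = true) then
        (s.1 + card, s.2)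
      else s)
    (0, PySem.Set.empty)).1

-- ===== PORT B =====
def calcPoints_alt (deck : List Int) : Int :=
  let counts : PySem.Dict Int Int :=
    deck.foldl (fun d card => d.insert card (d.getD card 0 + 1)) PySem.Dict.empty
  counts.items.foldl (fun total p =>
    if 4 ≤ p.2 then total + 10 * p.1
    else if p.2 = 3 then total + 5 * p.1
    else if p.2 = 2 then total + 3 * p.1
    else total + p.1) 0

-- ===== PRECONDITION & SPEC =====
def Spec_calcPoints (deck : List Int) (out : Int) : Prop := out = calcPoints_alt deck
instance (deck : List Int) (out : Int) : Decidable (Spec_calcPoints deck out) := by unfold Spec_calcPoints; infer_instance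

-- ===== CLAIM (what is proved, stated in full; the proofs are below) =====
def Claim_equal_calcPoints : Prop := ∀ (deck : List Int), Dom_calcPoints deck → Spec_calcPoints deck (calcPoints deck)

-- ===== LEMMAS AND PROOFS =====

-- the score of one distinct card, as a function of its multiplicity in the full deck
def pvScore (deck : List Int) (c : Int) : Int :=
  if 4 ≤ deck.count c then 10 * c
  else if deck.count c = 3 then 5 * c
  else if deck.count c = 2 then 3 * c
  else c

theorem pvContains_decide (s : PySem.Set Int) (c : Int) :
    PySem.Set.contains s c = decide (c ∈ s) := by
  simp [PySem.Set.contains_eq_listContains]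

-- A's loop invariant: over a suffix (sublist) l of deck, with the set agreeing with membership in
-- prev on l's elements, the accumulator grows by the scores of the distinct cards new w.r.t. prev.
theorem pvLoopA (deck : List Int) (l : List Int) (hsuf : l.Sublist deck) :
    ∀ (prev : List Int) (S : PySem.Set Int) (p : Int),
      (∀ c ∈ l, PySem.Set.contains S c = decide (c ∈ prev)) →
      (l.foldl (fun (s : Int × PySem.Set Int) card =>
          if 4 ≤ deck.count card ∧ ¬ (PySem.Set.contains s.2 card = true) then
            (s.1 + 10 * card, PySem.Set.add s.2 card)
          else if deck.count card = 3 ∧ ¬ (PySem.Set.contains s.2 card = true) then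
            (s.1 + 5 * card, PySem.Set.add s.2 card)
          else if deck.count card = 2 ∧ ¬ (PySem.Set.contains s.2 card = true) then
            (s.1 + 3 * card, PySem.Set.add s.2 card)
          else if ¬ (PySem.Set.contains s.2 card = true) then
            (s.1 + card, s.2)
          else s)
        (p, S)).1
      = p + ((PySem.Set.ofList (prev ++ l)).map (pvScore deck)).sum
          - ((PySem.Set.ofList prev).map (pvScore deck)).sum := by
  induction l with
  | nil => intro prev S p _; simp
  | cons card rest ih =>
    intro prev S p hS
    have hrest : rest.Sublist deck := (List.sublist_cons_self card rest).trans hsuf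
    have hcard : PySem.Set.contains S card = decide (card ∈ prev) := hS card (by simp)
    have hassoc : prev ++ card :: rest = (prev ++ [card]) ++ rest := by simp
    rw [List.foldl_cons]
    by_cases hmem : card ∈ prev
    · -- already counted: every branch is skipped, the state is unchanged
      have hc : PySem.Set.contains S card = true := by rw [hcard]; simp [hmem]
      simp only [hc, not_true_eq_false, and_false, if_false]
      rw [ih hrest prev S p (fun c hc' => hS c (List.mem_cons_of_mem _ hc'))]
      have hset : PySem.Set.ofList (prev ++ card :: rest) = PySem.Set.ofList (prev ++ rest) := by
        rw [hassoc, PySem.Set.ofList_append (prev ++ [card]) rest,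
            PySem.Set.ofList_append prev rest, PySem.Set.ofList_append_singleton,
            PySem.Set.add_of_mem ((PySem.Set.mem_ofList _ _).mpr hmem)]
      rw [hset]
    · -- first occurrence of a new card: one branch fires and adds pvScore deck card
      have hc : PySem.Set.contains S card = false := by rw [hcard]; simp [hmem]
      have hnotS : card ∉ (PySem.Set.ofList prev) := fun h =>
        hmem ((PySem.Set.mem_ofList _ _).mp h)
      have hsum : ((PySem.Set.ofList (prev ++ [card])).map (pvScore deck)).sum
          = ((PySem.Set.ofList prev).map (pvScore deck)).sum + pvScore deck card := by
        rw [PySem.Set.ofList_append_singleton, PySem.Set.add_of_not_mem hnotS]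
        simp
      have hS2 : ∀ c ∈ rest, PySem.Set.contains (PySem.Set.add S card) c
          = decide (c ∈ prev ++ [card]) := by
        intro c hcr
        have hSc := hS c (List.mem_cons_of_mem _ hcr)
        rw [pvContains_decide] at hSc ⊢
        have hiff : c ∈ S ↔ c ∈ prev := decide_eq_decide.mp hSc
        simp [PySem.Set.mem_add, hiff]
      by_cases h4 : 4 ≤ deck.count card
      · have hsc : pvScore deck card = 10 * card := by unfold pvScore; rw [if_pos h4]
        simp only [hc, Bool.false_eq_true, not_false_eq_true, and_true]
        rw [if_pos h4]
        rw [ih hrest (prev ++ [card]) (PySem.Set.add S card) (p + 10 * card) hS2, ← hassoc]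
        rw [hsum, hsc]; ring
      · by_cases h3 : deck.count card = 3
        · have hsc : pvScore deck card = 5 * card := by unfold pvScore; rw [if_neg h4, if_pos h3]
          simp only [hc, Bool.false_eq_true, not_false_eq_true, and_true]
          rw [if_neg h4, if_pos h3]
          rw [ih hrest (prev ++ [card]) (PySem.Set.add S card) (p + 5 * card) hS2, ← hassoc]
          rw [hsum, hsc]; ring
        · by_cases h2 : deck.count card = 2
          · have hsc : pvScore deck card = 3 * card := by unfold pvScore; rw [if_neg h4, if_neg h3, if_pos h2]
            simp only [hc, Bool.false_eq_true, not_false_eq_true, and_true]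
            rw [if_neg h4, if_neg h3, if_pos h2]
            rw [ih hrest (prev ++ [card]) (PySem.Set.add S card) (p + 3 * card) hS2, ← hassoc]
            rw [hsum, hsc]; ring
          · -- count ≤ 1: card is added to points but not to the set; it cannot reappear in rest
            have hsc : pvScore deck card = card := by unfold pvScore; rw [if_neg h4, if_neg h3, if_neg h2]
            have hcount : deck.count card ≤ 1 := by omega
            have hnr : card ∉ rest := by
              intro h
              have h1 : 2 ≤ (card :: rest).count card := by
                have := List.count_pos_iff.mpr h
                simp only [List.count_cons, beq_self_eq_true, if_true]
                omega
              have := hsuf.count_le card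
              omega
            have hS3 : ∀ c ∈ rest, PySem.Set.contains S c = decide (c ∈ prev ++ [card]) := by
              intro c hcr
              have hne : c ≠ card := fun h => hnr (h ▸ hcr)
              rw [hS c (List.mem_cons_of_mem _ hcr)]
              simp [hne]
            simp only [hc, Bool.false_eq_true, not_false_eq_true, and_true, ite_true]
            rw [if_neg h4, if_neg h3, if_neg h2]
            rw [ih hrest (prev ++ [card]) S (p + card) hS3, ← hassoc]
            rw [hsum, hsc]; ring

-- B computes the same per-distinct-card sum
theorem pvAltEq (deck : List Int) :
    calcPoints_alt deck = ((PySem.Set.ofList deck).map (pvScore deck)).sum := by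
  unfold calcPoints_alt
  rw [PySem.Dict.foldl_insert_getD_add_one_eq_counter]
  simp only [PySem.Dict.items_counter]
  have hbody : (fun (total : Int) (p : Int × Int) =>
      if 4 ≤ p.2 then total + 10 * p.1
      else if p.2 = 3 then total + 5 * p.1
      else if p.2 = 2 then total + 3 * p.1
      else total + p.1)
      = fun (total : Int) (p : Int × Int) => total +
        (if 4 ≤ p.2 then 10 * p.1 else if p.2 = 3 then 5 * p.1
         else if p.2 = 2 then 3 * p.1 else p.1) := by
    funext t q; split_ifs <;> ring
  rw [hbody, PySem.List.foldl_add, List.map_map]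
  have hfun : ∀ k ∈ PySem.Set.ofList deck,
      ((fun (p : Int × Int) =>
        if 4 ≤ p.2 then 10 * p.1 else if p.2 = 3 then 5 * p.1
        else if p.2 = 2 then 3 * p.1 else p.1) ∘ fun k => (k, (deck.count k : Int))) k
      = pvScore deck k := by
    intro k _
    have e4 : ((4:Int) ≤ (deck.count k : Int)) ↔ 4 ≤ deck.count k := by omega
    have e3 : ((deck.count k : Int) = 3) ↔ deck.count k = 3 := by omega
    have e2 : ((deck.count k : Int) = 2) ↔ deck.count k = 2 := by omega
    simp only [Function.comp, pvScore, e4, e3, e2]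
  rw [List.map_congr_left hfun]
  ring

-- ===== VERDICT (by name: the statement is the Claim_ definition above) =====
theorem calcPoints_spec : Claim_equal_calcPoints := by
  intro deck _
  unfold Spec_calcPoints calcPoints
  rw [pvLoopA deck deck (List.Sublist.refl deck) [] PySem.Set.empty 0
      (by intro c _; simp [PySem.Set.empty])]
  rw [pvAltEq]
  simp
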